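-- pv_equiv track=rewrite | github.com/int-brain-lab/iblscripts | deploy/serverpc/ephys/synchronization_protocol_3a.py | first_occ_index
-- ===== SOURCE A (Python) =====
-- def first_occ_index(array, n_at_least):
--     """
--     Getting index of first occurence in boolean array
--     with at least n consecutive False entries
--     """
--     curr_found_false = 0
--     curr_index = 0
--     for index, elem in enumerate(array):
--         if not elem:
--             if curr_found_false == 0:
--                 curr_index = index
--             curr_found_false += 1
--             if curr_found_false == n_at_least:
--                 return curr_index
--         else:
--             curr_found_false = 0
-- ===== SOURCE B (Python) =====
-- def first_occ_index(array, n_at_least):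
--     """Run-based scan: jump over maximal runs of equal values; return the start
--     index of the first False-run of length >= n_at_least."""
--     if n_at_least <= 0:
--         return None
--     i = 0
--     length = len(array)
--     while i < length:
--         j = i + 1
--         while j < length and array[j] == array[i]:
--             j += 1
--         if (not array[i]) and j - i >= n_at_least:
--             return i
--         i = j
--     return None
-- ===== Notes on version B (the rewrite author's own statement) =====
-- stated objective: alternative
-- what changed: Replaces A's per-element scan with a counter/stale-index state by a run-based scan that jumps over maximal runs of equal values, returning the run's start offset when a False-run of sufficient length is found.
import Mathlib
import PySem

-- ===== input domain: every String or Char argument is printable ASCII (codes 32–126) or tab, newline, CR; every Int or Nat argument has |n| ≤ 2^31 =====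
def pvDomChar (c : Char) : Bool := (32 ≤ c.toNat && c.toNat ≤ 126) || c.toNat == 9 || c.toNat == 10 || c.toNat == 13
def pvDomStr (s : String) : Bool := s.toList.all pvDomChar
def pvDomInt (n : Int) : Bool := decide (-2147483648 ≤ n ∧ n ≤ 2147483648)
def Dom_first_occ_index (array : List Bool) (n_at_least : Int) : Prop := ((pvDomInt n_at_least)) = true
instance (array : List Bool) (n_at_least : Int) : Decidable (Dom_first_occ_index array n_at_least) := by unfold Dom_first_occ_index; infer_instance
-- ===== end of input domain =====

-- B replaces A's per-element counter scan by a run-based scan over maximal runs of equal values (objective: alternative).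


-- ===== PORT A =====
-- the for-loop of A: state (curr_found_false, curr_index), index carried explicitly (enumerate)
def pvALoop (n : Int) : List Bool → Int → Int → Int → Option Int
  | [], _, _, _ => none
  | elem :: rest, index, curr_found_false, curr_index =>
    if !elem then
      let curr_index' := if curr_found_false = 0 then index else curr_index
      let curr_found_false' := curr_found_false + 1
      if curr_found_false' = n then some curr_index'
      else pvALoop n rest (index + 1) curr_found_false' curr_index'
    else
      pvALoop n rest (index + 1) 0 curr_index

def first_occ_index (array : List Bool) (n_at_least : Int) : Option Int :=
  pvALoop n_at_least array 0 0 0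

-- ===== PORT B =====
-- B's pointers (i, j) are carried as the absolute offset i and the remaining suffix
-- array[i:]; the inner while (j scanning the run) is the count of further run elements
def pvRunLen (head : Bool) : List Bool → Nat
  | [] => 0
  | x :: xs => if x = head then pvRunLen head xs + 1 else 0

-- outer while of B: one step per maximal run (i := j becomes dropping the run)
def pvBLoop (n : Int) (rest : List Bool) (offset : Int) : Option Int :=
  match rest with
  | [] => none
  | head :: tail =>
    let k := pvRunLen head tail + 1
    if !head ∧ n ≤ (k : Int) then some offset
    else pvBLoop n (tail.drop (pvRunLen head tail)) (offset + (k : Int))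
termination_by rest.length
decreasing_by simp

def first_occ_index_alt (array : List Bool) (n_at_least : Int) : Option Int :=
  if n_at_least ≤ 0 then none else pvBLoop n_at_least array 0

-- ===== PRECONDITION & SPEC =====
def Spec_first_occ_index (array : List Bool) (n_at_least : Int) (out : Option Int) : Prop := out = first_occ_index_alt array n_at_least
instance (array : List Bool) (n_at_least : Int) (out : Option Int) : Decidable (Spec_first_occ_index array n_at_least out) := by unfold Spec_first_occ_index; infer_instance

-- ===== CLAIM (what is proved, stated in full; the proofs are below) =====
def Claim_equal_first_occ_index : Prop := ∀ (array : List Bool) (n_at_least : Int), Dom_first_occ_index array n_at_least → Spec_first_occ_index array n_at_least (first_occ_index array n_at_least)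

-- ===== LEMMAS AND PROOFS =====

-- n ≤ 0: A's counter is always ≥ 1 after the increment, so the loop never returns
theorem pvALoop_nonpos (n : Int) (hn : n ≤ 0) :
    ∀ (t : List Bool) (idx cff ci : Int), 0 ≤ cff → pvALoop n t idx cff ci = none := by
  intro t
  induction t with
  | nil => intro idx cff ci _; rfl
  | cons e r ih =>
    intro idx cff ci hcff
    by_cases he : e
    · simp only [pvALoop, he]
      rw [if_neg (by simp)]
      exact ih _ _ _ (by omega)
    · simp only [pvALoop, he, Bool.not_false, if_true]
      have : ¬ (cff + 1 = n) := by omega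
      simp only [this, if_false]
      exact ih _ _ _ (by omega)

-- a run of falses in A's loop: either the counter reaches n inside the run (returns the saved
-- index ci), or the loop emerges after the run with counter cff + runlen
theorem pvALoop_false_run (n : Int) :
    ∀ (t : List Bool) (idx cff ci : Int), 1 ≤ cff → cff < n →
      pvALoop n t idx cff ci =
        if n ≤ cff + (pvRunLen false t : Int) then some ci
        else pvALoop n (t.drop (pvRunLen false t)) (idx + (pvRunLen false t : Int)) (cff + (pvRunLen false t : Int)) ci := by
  intro t
  induction t with
  | nil => intro idx cff ci h1 h2; simp [pvALoop, pvRunLen]; omega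
  | cons e r ih =>
    intro idx cff ci h1 h2
    by_cases he : e
    · have hrl : pvRunLen false (e :: r) = 0 := by simp [pvRunLen, he]
      simp [hrl]
      omega
    · have he' : e = false := by simpa using he
      subst he'
      have hrl : pvRunLen false (false :: r) = pvRunLen false r + 1 := by simp [pvRunLen]
      simp only [pvALoop, Bool.not_false, if_true, hrl]
      have hci : (if cff = 0 then idx else ci) = ci := by
        have : ¬ (cff = 0) := by omega
        simp [this]
      rw [hci]
      by_cases hend : cff + 1 = n
      · simp only [hend, if_true]
        rw [if_pos (by push_cast; omega)]
      · simp only [hend, if_false]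
        rw [ih (idx + 1) (cff + 1) ci (by omega) (by omega)]
        have hd : r.drop (pvRunLen false r) = (false :: r).drop (pvRunLen false r + 1) := by simp
        by_cases hge : n ≤ cff + 1 + (pvRunLen false r : Int)
        · have : n ≤ cff + ((pvRunLen false r + 1 : Nat) : Int) := by push_cast; omega
          simp only [hge, if_true, this, if_true]
        · have : ¬ n ≤ cff + ((pvRunLen false r + 1 : Nat) : Int) := by push_cast; omega
          simp only [hge, if_false, this, if_false, hd]
          congr 1 <;> push_cast <;> ring

-- a run of trues in A's loop is a no-op except advancing the index
theorem pvALoop_true_run (n : Int) :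
    ∀ (t : List Bool) (idx ci : Int),
      pvALoop n t idx 0 ci =
        pvALoop n (t.drop (pvRunLen true t)) (idx + (pvRunLen true t : Int)) 0 ci := by
  intro t
  induction t with
  | nil => intro idx ci; simp [pvRunLen]
  | cons e r ih =>
    intro idx ci
    by_cases he : e
    · subst he
      have hrl : pvRunLen true (true :: r) = pvRunLen true r + 1 := by simp [pvRunLen]
      simp only [pvALoop, hrl, Bool.not_true]
      rw [if_neg (show ¬ ((false : Bool) = true) by simp), ih (idx + 1) ci,
          List.drop_succ_cons]
      congr 1
      push_cast; ring
    · have he' : e = false := by simpa using he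
      subst he'
      simp [pvRunLen]

-- the element immediately after a maximal front run of `b` is not `b`
theorem pvRunLen_next (b : Bool) :
    ∀ (r : List Bool) (h : pvRunLen b r < r.length), r[pvRunLen b r]'h ≠ b := by
  intro r
  induction r with
  | nil => intro h; simp at h
  | cons y ys ih =>
    intro h
    by_cases hy : y = b
    · subst hy
      have hrl : pvRunLen y (y :: ys) = pvRunLen y ys + 1 := by simp [pvRunLen]
      simp only [hrl] at h ⊢
      simpa using ih (by simpa using h)
    · have hrl : pvRunLen b (y :: ys) = 0 := by simp [pvRunLen, hy]
      simp only [hrl]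
      simpa using hy

-- main loop correspondence: with the counter at 0 the saved index is irrelevant and
-- A's element-wise loop equals B's run-jumping loop
theorem pvLoop_eq_aux (n : Int) (hn : 1 ≤ n) :
    ∀ (m : Nat) (t : List Bool), t.length < m → ∀ (idx ci : Int),
      pvALoop n t idx 0 ci = pvBLoop n t idx := by
  intro m
  induction m with
  | zero => intro t h; omega
  | succ m ih =>
    intro t ht idx ci
    match t with
    | [] =>
      show pvALoop n [] idx 0 ci = pvBLoop n [] idx
      unfold pvBLoop
      rfl
    | e :: r =>
      by_cases he : e
      · subst he
        -- true head: A walks the true run element by element, B jumps over it in one step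
        have hA := pvALoop_true_run n (true :: r) idx ci
        have hrl : pvRunLen true (true :: r) = pvRunLen true r + 1 := by simp [pvRunLen]
        rw [hA, hrl]
        simp only [List.drop_succ_cons]
        rw [ih (r.drop (pvRunLen true r)) (by simp at ht ⊢; omega)]
        conv_rhs => unfold pvBLoop
        rw [if_neg (by simp)]
      · have he' : e = false := by simpa using he
        subst he'
        -- false head: unroll A one step, then follow the false run with the run lemma
        simp only [pvALoop, Bool.not_false, if_true]
        conv_rhs => unfold pvBLoop
        simp only [Bool.not_false, true_and]
        by_cases h1 : (1 : Int) = n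
        · rw [if_pos (show (0 : Int) + 1 = n by omega),
              if_pos (show n ≤ ((pvRunLen false r + 1 : Nat) : Int) by push_cast; omega)]
        · rw [if_neg (show ¬ ((0 : Int) + 1 = n) by omega)]
          rw [show (0 : Int) + 1 = 1 by norm_num]
          rw [pvALoop_false_run n r (idx + 1) 1 idx (le_refl _) (by omega)]
          by_cases hge : n ≤ 1 + (pvRunLen false r : Int)
          · rw [if_pos hge,
                if_pos (show n ≤ ((pvRunLen false r + 1 : Nat) : Int) by push_cast; omega)]
          · have h2 : ¬ n ≤ ((pvRunLen false r + 1 : Nat) : Int) := by push_cast; omega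
            simp only [hge, if_false, h2, if_false]
            rcases hdrop : r.drop (pvRunLen false r) with _ | ⟨x, rest⟩
            · -- the false run reaches the end of the list: both sides run out
              show pvALoop n [] _ _ _ = pvBLoop n [] _
              unfold pvBLoop
              rfl
            · have hlt : pvRunLen false r < r.length := by
                have := congrArg List.length hdrop
                simp at this; omega
              have hx : x = true := by
                have hx0 : r[pvRunLen false r]'hlt = x := by
                  have : (r.drop (pvRunLen false r))[0]'(by simp [hdrop]) = x := by
                    simp [hdrop]
                  simpa using this
                have := pvRunLen_next false r hlt
                rw [hx0] at this
                simpa using this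
              subst hx
              -- A: one step through the true head resets the counter to 0,
              -- which is the state the induction hypothesis covers
              have hoff : idx + 1 + (pvRunLen false r : Int) =
                  idx + ((pvRunLen false r + 1 : Nat) : Int) := by push_cast; ring
              rw [hoff]
              have hstep : ∀ (j cff : Int),
                  pvALoop n (true :: rest) j cff idx = pvALoop n rest (j + 1) 0 idx := by
                intro j cff
                simp [pvALoop]
              rw [hstep, ← hstep _ 0,
                  ih (true :: rest) (by
                    have := congrArg List.length hdrop
                    simp at this ht ⊢; omega)]

theorem pvLoop_eq (n : Int) (hn : 1 ≤ n) (t : List Bool) (idx ci : Int) :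
    pvALoop n t idx 0 ci = pvBLoop n t idx :=
  pvLoop_eq_aux n hn (t.length + 1) t (by omega) idx ci

-- ===== VERDICT (by name: the statement is the Claim_ definition above) =====
theorem first_occ_index_spec : Claim_equal_first_occ_index := by
  intro array n _
  unfold Spec_first_occ_index first_occ_index first_occ_index_alt
  by_cases hn : n ≤ 0
  · simp only [hn, if_true]
    exact pvALoop_nonpos n hn array 0 0 0 (le_refl _)
  · simp only [hn, if_false]
    exact pvLoop_eq n (by omega) array 0 0
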